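-- pv_equiv track=rewrite | github.com/jff97/offsuitPokerLeagueLeaderboard | src/poker_scraper/name_tools/determine_name_ambiguities.py | get_sorted_line_items
-- ===== SOURCE A (Python) =====
-- def get_sorted_line_items(name_actions, show_keeps):
--     items = []
--
--     # Separate entries by action for nicer output order
--     for norm_name, (action, related, player_bar_list) in sorted(name_actions.items()):
--         if action == "KEEP" and show_keeps:
--             items.append((norm_name, action, related, player_bar_list))
--
--     for norm_name, (action, related, player_bar_list) in sorted(name_actions.items()):
--         if action == "ADD_LAST_NAME":
--             items.append((norm_name, action, related, player_bar_list))
--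
--     for norm_name, (action, related, player_bar_list) in sorted(name_actions.items()):
--         if action != "KEEP" and action != "ADD_LAST_NAME":
--             items.append((norm_name, action, related, player_bar_list))
--     return items
-- ===== SOURCE B (Python) =====
-- def get_sorted_line_items(name_actions, show_keeps):
--     # Single sort, single pass: bucket each item into one of three lists, then
--     # return them in the fixed category order KEEP / ADD_LAST_NAME / other.
--     keeps, adds, others = [], [], []
--     for norm_name, (action, related, player_bar_list) in sorted(name_actions.items()):
--         if action == "KEEP":
--             if show_keeps:
--                 keeps.append((norm_name, action, related, player_bar_list))
--         elif action == "ADD_LAST_NAME":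
--             adds.append((norm_name, action, related, player_bar_list))
--         else:
--             others.append((norm_name, action, related, player_bar_list))
--     return keeps + adds + others
-- ===== Notes on version B (the rewrite author's own statement) =====
-- stated objective: simpler
-- what changed: A sorts the items three times and scans each sorted copy for one category; B sorts once and buckets every item into keeps/adds/others in a single pass, returning keeps + adds + others.
import Mathlib
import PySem

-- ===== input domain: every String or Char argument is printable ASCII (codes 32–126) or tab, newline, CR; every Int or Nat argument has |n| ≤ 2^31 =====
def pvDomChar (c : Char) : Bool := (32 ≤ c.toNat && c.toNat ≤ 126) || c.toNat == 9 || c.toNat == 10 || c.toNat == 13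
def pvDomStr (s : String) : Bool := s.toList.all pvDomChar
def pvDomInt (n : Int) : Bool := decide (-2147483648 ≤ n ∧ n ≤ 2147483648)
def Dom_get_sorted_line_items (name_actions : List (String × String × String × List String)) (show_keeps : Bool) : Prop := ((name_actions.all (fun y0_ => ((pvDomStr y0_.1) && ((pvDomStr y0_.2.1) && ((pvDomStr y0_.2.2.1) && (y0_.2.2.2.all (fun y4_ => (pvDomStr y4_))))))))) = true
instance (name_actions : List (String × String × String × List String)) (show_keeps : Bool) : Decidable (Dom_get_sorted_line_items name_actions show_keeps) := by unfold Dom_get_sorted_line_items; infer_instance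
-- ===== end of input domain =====

-- B replaces A's three sorts + three category scans by one sort and one bucketing pass (objective: simpler).

-- ===== PORT A =====
-- name_actions is a Python dict (assoc list; Dict.ofList gives dict semantics). Its keys are
-- distinct, so Python's sorted(items) (full-tuple comparison) is exactly a stable sort by the key.
def get_sorted_line_items (name_actions : List (String × String × String × List String)) (show_keeps : Bool) : List (String × String × String × List String) :=
  let items0 : List (String × String × String × List String) := []
  -- first loop: KEEP (gated by show_keeps)
  let items1 := (PySem.List.sorted (PySem.Dict.ofList name_actions).items (fun p => p.1) false).foldl
    (fun acc p => if p.2.1 == "KEEP" && show_keeps then acc ++ [p] else acc) items0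
  -- second loop: ADD_LAST_NAME
  let items2 := (PySem.List.sorted (PySem.Dict.ofList name_actions).items (fun p => p.1) false).foldl
    (fun acc p => if p.2.1 == "ADD_LAST_NAME" then acc ++ [p] else acc) items1
  -- third loop: everything else
  (PySem.List.sorted (PySem.Dict.ofList name_actions).items (fun p => p.1) false).foldl
    (fun acc p => if p.2.1 != "KEEP" && p.2.1 != "ADD_LAST_NAME" then acc ++ [p] else acc) items2

-- ===== PORT B =====
def get_sorted_line_items_alt (name_actions : List (String × String × String × List String)) (show_keeps : Bool) : List (String × String × String × List String) :=
  let r := (PySem.List.sorted (PySem.Dict.ofList name_actions).items (fun p => p.1) false).foldl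
    (fun (b : List (String × String × String × List String) × List (String × String × String × List String) × List (String × String × String × List String)) p =>
      if p.2.1 == "KEEP" then (if show_keeps then (b.1 ++ [p], b.2.1, b.2.2) else b)
      else if p.2.1 == "ADD_LAST_NAME" then (b.1, b.2.1 ++ [p], b.2.2)
      else (b.1, b.2.1, b.2.2 ++ [p]))
    ([], [], [])
  r.1 ++ r.2.1 ++ r.2.2

-- ===== PRECONDITION & SPEC =====
def Spec_get_sorted_line_items (name_actions : List (String × String × String × List String)) (show_keeps : Bool) (out : List (String × String × String × List String)) : Prop := out = get_sorted_line_items_alt name_actions show_keeps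
instance (name_actions : List (String × String × String × List String)) (show_keeps : Bool) (out : List (String × String × String × List String)) : Decidable (Spec_get_sorted_line_items name_actions show_keeps out) := by unfold Spec_get_sorted_line_items; infer_instance

-- ===== CLAIM (what is proved, stated in full; the proofs are below) =====
def Claim_equal_get_sorted_line_items : Prop := ∀ (name_actions : List (String × String × String × List String)) (show_keeps : Bool), Dom_get_sorted_line_items name_actions show_keeps → Spec_get_sorted_line_items name_actions show_keeps (get_sorted_line_items name_actions show_keeps)

-- ===== LEMMAS AND PROOFS =====

-- B's loop body, named for the proofs (definitionally equal to the lambda in the port of B).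
def pvStep (sk : Bool)
    (b : List (String × String × String × List String) × List (String × String × String × List String) × List (String × String × String × List String))
    (p : String × String × String × List String) :
    List (String × String × String × List String) × List (String × String × String × List String) × List (String × String × String × List String) :=
  if p.2.1 == "KEEP" then (if sk then (b.1 ++ [p], b.2.1, b.2.2) else b)
  else if p.2.1 == "ADD_LAST_NAME" then (b.1, b.2.1 ++ [p], b.2.2)
  else (b.1, b.2.1, b.2.2 ++ [p])

-- B's single bucketing pass computes the three filtered sublists A's three scans collect.
theorem pv_bucket (sk : Bool) (s : List (String × String × String × List String)) :
    ∀ k a o : List (String × String × String × List String),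
    s.foldl (pvStep sk) (k, a, o)
    = (k ++ s.filter (fun p => p.2.1 == "KEEP" && sk),
       a ++ s.filter (fun p => p.2.1 == "ADD_LAST_NAME"),
       o ++ s.filter (fun p => p.2.1 != "KEEP" && p.2.1 != "ADD_LAST_NAME")) := by
  induction s with
  | nil => intro k a o; simp
  | cons x t ih =>
    intro k a o
    rw [List.foldl_cons]
    by_cases h1 : x.2.1 = "KEEP"
    · cases sk
      · rw [show pvStep false (k, a, o) x = (k, a, o) from by simp [pvStep, h1], ih]
        simp [h1]
      · rw [show pvStep true (k, a, o) x = (k ++ [x], a, o) from by simp [pvStep, h1], ih]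
        simp [h1]
    · by_cases h2 : x.2.1 = "ADD_LAST_NAME"
      · rw [show pvStep sk (k, a, o) x = (k, a ++ [x], o) from by simp [pvStep, h2], ih]
        simp [h2]
      · rw [show pvStep sk (k, a, o) x = (k, a, o ++ [x]) from by simp [pvStep, h1, h2], ih]
        simp [h1, h2]

-- ===== VERDICT (by name: the statement is the Claim_ definition above) =====
theorem get_sorted_line_items_spec : Claim_equal_get_sorted_line_items := by
  intro name_actions show_keeps _
  unfold Spec_get_sorted_line_items get_sorted_line_items get_sorted_line_items_alt
  rw [show (fun (b : List (String × String × String × List String) × List (String × String × String × List String) × List (String × String × String × List String)) p =>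
      if p.2.1 == "KEEP" then (if show_keeps then (b.1 ++ [p], b.2.1, b.2.2) else b)
      else if p.2.1 == "ADD_LAST_NAME" then (b.1, b.2.1 ++ [p], b.2.2)
      else (b.1, b.2.1, b.2.2 ++ [p])) = pvStep show_keeps from rfl]
  rw [pv_bucket]
  simp only [PySem.List.foldl_append_if, List.nil_append, List.map_id', List.append_assoc]
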